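-- pv_equiv track=rewrite | github.com/rshaurya/Data-Structures | missing_number.py | missingNum_dict
-- ===== SOURCE A (Python) =====
-- def missingNum_dict(nums):
--     d = {}
--     res = None
--     for i in range(1, len(nums) + 1):
--         d[i] = 0
--     for i in nums:
--         d[i] = 1
--     for i, j in d.items():
--         if j == 0:
--             res = i
--
--     return res
-- ===== SOURCE B (Python) =====
-- def missingNum_dict(nums):
--     n = len(nums)
--     k = n
--     for v in sorted({x for x in nums if 1 <= x <= n}, reverse=True):
--         if v < k:
--             return k
--         k -= 1
--     return k if k >= 1 else None
-- ===== Notes on version B (the rewrite author's own statement) =====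
-- stated objective: faster
-- what changed: Replaces the three staged passes over a dict of 0/1 flags (last zero-flag key wins) by sorting the distinct in-range values descending and counting k down from n: the first position where the sorted value falls below k exposes k as the largest missing number.
import Mathlib
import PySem

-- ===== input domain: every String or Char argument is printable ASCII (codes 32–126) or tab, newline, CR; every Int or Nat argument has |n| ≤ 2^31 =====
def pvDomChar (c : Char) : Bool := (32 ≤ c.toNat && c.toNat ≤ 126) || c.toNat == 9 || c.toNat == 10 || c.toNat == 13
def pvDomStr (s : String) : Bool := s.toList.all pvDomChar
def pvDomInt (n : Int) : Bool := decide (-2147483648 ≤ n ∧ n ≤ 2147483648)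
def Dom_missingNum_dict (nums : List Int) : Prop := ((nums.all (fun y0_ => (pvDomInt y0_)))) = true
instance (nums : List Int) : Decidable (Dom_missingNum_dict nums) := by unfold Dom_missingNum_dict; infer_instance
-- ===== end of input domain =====

-- B replaces A's three staged passes over a 0/1-flag dict by sorting the distinct in-range values
-- descending and counting k down from n: the first gap (v < k) is the answer (alternative algorithm).

-- ===== PORT A =====
def missingNum_dict (nums : List Int) : Option Int :=
  let d : PySem.Dict Int Int := PySem.Dict.empty
  let d1 := (PySem.List.pyRange 1 ((nums.length : Int) + 1) 1).foldl (fun d i => d.insert i 0) d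
  let d2 := nums.foldl (fun d i => d.insert i 1) d1
  d2.items.foldl (fun res p => if p.2 == 0 then some p.1 else res) none

-- ===== PORT B =====
-- the for-loop with early return: 'if v < k: return k; k -= 1', then 'return k if k >= 1 else None'
def pvBloop : List Int → Int → Option Int
  | [], k => if 1 ≤ k then some k else none
  | v :: rest, k => if v < k then some k else pvBloop rest (k - 1)

def missingNum_dict_alt (nums : List Int) : Option Int :=
  let n : Int := nums.length
  pvBloop (PySem.List.sorted (PySem.Set.ofList (nums.filter (fun x => decide (1 ≤ x) && decide (x ≤ n)))) (fun x => x) true) n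

-- ===== PRECONDITION & SPEC =====
def Spec_missingNum_dict (nums : List Int) (out : Option Int) : Prop := out = missingNum_dict_alt nums
instance (nums : List Int) (out : Option Int) : Decidable (Spec_missingNum_dict nums out) := by unfold Spec_missingNum_dict; infer_instance

-- ===== CLAIM (what is proved, stated in full; the proofs are below) =====
def Claim_equal_missingNum_dict : Prop := ∀ (nums : List Int), Dom_missingNum_dict nums → Spec_missingNum_dict nums (missingNum_dict nums)

-- ===== LEMMAS AND PROOFS =====

-- range(1, k+1) as a mapped List.range
lemma pv_rangeEq (k : Nat) :
    PySem.List.pyRange 1 ((k : Int) + 1) 1 = (List.range k).map (fun j : Nat => 1 + 1 * (j : Int)) := by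
  rcases Nat.eq_zero_or_pos k with h | h
  · subst h; simp [PySem.List.pyRange]
  · have h1 : (1:Int) < (k:Int)+1 := by exact_mod_cast Nat.succ_lt_succ h
    have h2 : (((k:Int)+1 - 1 + 1 - 1)/1).toNat = k := by norm_num
    simp only [PySem.List.pyRange, if_neg one_ne_zero, if_pos h1,
      if_pos (by norm_num : (0:Int) < 1), h2]

lemma pv_mem_range (k : Nat) (x : Int) :
    x ∈ (List.range k).map (fun j : Nat => 1 + 1 * (j : Int)) ↔ 1 ≤ x ∧ x ≤ (k : Int) := by
  simp only [List.mem_map, List.mem_range]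
  constructor
  · rintro ⟨j, hj, rfl⟩; omega
  · rintro ⟨h1, h2⟩
    refine ⟨(x - 1).toNat, by omega, by omega⟩

lemma pv_range_succ (k : Nat) :
    (List.range (k+1)).map (fun j : Nat => 1 + 1 * (j : Int))
      = (List.range k).map (fun j : Nat => 1 + 1 * (j : Int)) ++ [(k : Int) + 1] := by
  rw [List.range_succ, List.map_append]
  simp
  omega

lemma pv_range_pairwise (k : Nat) :
    ((List.range k).map (fun j : Nat => 1 + 1 * (j : Int))).Pairwise (· < ·) := by
  refine List.Pairwise.map _ ?_ List.pairwise_lt_range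
  intro a b hab
  omega

lemma pv_pairwise_nodup {l : List Int} (h : l.Pairwise (· < ·)) : l.Nodup :=
  h.imp (fun hab => ne_of_lt hab)

-- phase 1: inserting fresh distinct keys appends them in order
lemma pv_foldl_insert_fresh (v : Int) (ks : List Int) : ∀ (d : PySem.Dict Int Int),
    ks.Nodup → (∀ i ∈ ks, d.contains i = false) →
    (ks.foldl (fun d i => d.insert i v) d).items = d.items ++ ks.map (fun i => (i, v)) := by
  induction ks with
  | nil => intro d _ _; simp
  | cons x t ih =>
    intro d hnd hf
    have hx : d.contains x = false := hf x (by simp)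
    have hins : d.insert x v = ⟨d.items ++ [(x, v)]⟩ := by
      simp [PySem.Dict.insert, hx]
    simp only [List.foldl_cons, hins]
    rw [ih ⟨d.items ++ [(x, v)]⟩ (List.Nodup.of_cons hnd) ?_]
    · simp
    · intro i hi
      have hix : ¬ (x = i) := by
        rintro rfl
        exact (List.nodup_cons.mp hnd).1 hi
      have hdi : d.contains i = false := hf i (List.mem_cons_of_mem x hi)
      simp only [PySem.Dict.contains] at hdi ⊢
      simp [List.any_append, hdi, hix]

-- one insert of value 1 into front-plus-ones-tail shape
lemma pv_insert_one_step (R : List Int) (f : Int → Int) (tail : List (Int × Int))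
    (htail : ∀ p ∈ tail, p.2 = 1) (x : Int) :
    ∃ tail', (PySem.Dict.mk (R.map (fun i => (i, f i)) ++ tail) : PySem.Dict Int Int).insert x 1
        = PySem.Dict.mk (R.map (fun i => (i, if i = x then 1 else f i)) ++ tail')
      ∧ ∀ p ∈ tail', p.2 = 1 := by
  by_cases hc : (PySem.Dict.mk (R.map (fun i => (i, f i)) ++ tail) : PySem.Dict Int Int).contains x = true
  · refine ⟨tail.map (fun p => if p.1 == x then (x, 1) else p), ?_, ?_⟩
    · simp only [PySem.Dict.insert, hc, if_pos]
      congr 1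
      rw [List.map_append, List.map_map]
      congr 1
      apply List.map_congr_left
      intro i _
      by_cases hix : i = x
      · subst hix; simp
      · simp [hix]
    · intro p hp
      rw [List.mem_map] at hp
      obtain ⟨q, hq, rfl⟩ := hp
      by_cases hqx : q.1 == x
      · simp [hqx]
      · simpa [hqx] using htail q hq
  · have hxR : ∀ i ∈ R, ¬ (i = x) := by
      intro i hiR hix
      subst hix
      apply hc
      simp [PySem.Dict.contains]
      exact Or.inl hiR
    rw [Bool.not_eq_true] at hc
    refine ⟨tail ++ [(x, 1)], ?_, ?_⟩
    · have hins : (PySem.Dict.mk (R.map (fun i => (i, f i)) ++ tail) : PySem.Dict Int Int).insert x 1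
          = PySem.Dict.mk ((R.map (fun i => (i, f i)) ++ tail) ++ [(x, 1)]) := by
        simp [PySem.Dict.insert, hc]
      rw [hins]
      congr 1
      rw [List.append_assoc]
      congr 1
      apply List.map_congr_left
      intro i hiR
      simp [hxR i hiR]
    · intro p hp
      rcases List.mem_append.mp hp with h | h
      · exact htail p h
      · simp at h; simp [h]

-- phase 2: folding value-1 inserts keeps the front keyed by R, tail all ones
lemma pv_foldl_insert_one (ys : List Int) : ∀ (R : List Int) (f : Int → Int) (tail : List (Int × Int)),
    (∀ p ∈ tail, p.2 = 1) →
    ∃ tail', ys.foldl (fun d i => d.insert i 1) (PySem.Dict.mk (R.map (fun i => (i, f i)) ++ tail))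
        = PySem.Dict.mk (R.map (fun i => (i, if i ∈ ys then 1 else f i)) ++ tail')
      ∧ ∀ p ∈ tail', p.2 = 1 := by
  induction ys with
  | nil =>
    intro R f tail ht
    exact ⟨tail, by simp, ht⟩
  | cons y t ih =>
    intro R f tail ht
    obtain ⟨tail1, heq, ht1⟩ := pv_insert_one_step R f tail ht y
    obtain ⟨tail2, heq2, ht2⟩ := ih R (fun i => if i = y then 1 else f i) tail1 ht1
    refine ⟨tail2, ?_, ht2⟩
    simp only [List.foldl_cons, heq, heq2]
    congr 2
    apply List.map_congr_left
    intro i _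
    by_cases h1 : i ∈ t
    · simp [h1]
    · by_cases h2 : i = y
      · simp [h2]
      · simp [h2]

-- a run of value-1 items never updates the result accumulator
lemma pv_foldl_res_ones (tail : List (Int × Int)) : ∀ (acc : Option Int),
    (∀ p ∈ tail, p.2 = 1) →
    tail.foldl (fun res p => if p.2 == 0 then some p.1 else res) acc = acc := by
  induction tail with
  | nil => intro acc _; rfl
  | cons q t ih =>
    intro acc h
    have h2 : q.2 = 1 := h q (by simp)
    simp only [List.foldl_cons, h2]
    exact ih acc (fun p hp => h p (List.mem_cons_of_mem q hp))

-- A's last-hit loop computes the last element of the filtered list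
lemma pv_foldl_last_filter (p : Int → Bool) (l : List Int) : ∀ (acc : Option Int),
    l.foldl (fun res i => if p i then some i else res) acc
      = if l.filter p = [] then acc else (l.filter p).getLast? := by
  induction l with
  | nil => intro acc; simp
  | cons x t ih =>
    intro acc
    by_cases hp : p x
    · simp only [List.foldl_cons, if_pos hp, List.filter_cons_of_pos hp]
      rw [ih (some x)]
      by_cases h0 : t.filter p = []
      · simp [h0]
      · obtain ⟨y, ys, hys⟩ := List.exists_cons_of_ne_nil h0
        rw [if_neg h0, if_neg (by simp), hys, List.getLast?_cons_cons]
    · simp only [List.foldl_cons, if_neg hp, List.filter_cons_of_neg hp]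
      exact ih acc

-- find? over a reversed list is getLast? of the filtered list
lemma pv_find?_reverse (p : Int → Bool) (l : List Int) :
    l.reverse.find? p = (l.filter p).getLast? := by
  induction l using List.reverseRecOn with
  | nil => rfl
  | append_singleton t x ih =>
    rw [List.reverse_append, List.filter_append]
    by_cases hp : p x
    · simp [hp]
    · simp only [List.reverse_cons, List.reverse_nil, List.nil_append, List.find?_cons,
        hp, List.filter_cons, List.filter_nil]
      simpa [hp] using ih

lemma pv_find?_congr (l : List Int) (p q : Int → Bool) (h : ∀ x ∈ l, p x = q x) :
    l.find? p = l.find? q := by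
  induction l with
  | nil => rfl
  | cons x t ih =>
    have hx := h x (by simp)
    simp only [List.find?_cons, hx]
    cases hq : q x
    · exact ih (fun y hy => h y (List.mem_cons_of_mem x hy))
    · rfl

-- B's count-down loop finds, scanning k = m, m-1, …, 1, the first k missing from vals
lemma pv_bloop_char (m : Nat) : ∀ (vals : List Int), vals.Pairwise (· > ·) →
    (∀ v ∈ vals, 1 ≤ v ∧ v ≤ (m : Int)) →
    pvBloop vals (m : Int)
      = ((List.range m).map (fun j : Nat => 1 + 1 * (j : Int))).reverse.find?
          (fun i => !(decide (i ∈ vals))) := by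
  induction m with
  | zero =>
    intro vals _ hmem
    cases vals with
    | nil => simp [pvBloop]
    | cons v rest =>
      have := hmem v (by simp)
      omega
  | succ m ih =>
    intro vals hpw hmem
    have hcast : (((m+1 : Nat)) : Int) = (m : Int) + 1 := by push_cast; ring
    have hsplit : ((List.range (m+1)).map (fun j : Nat => 1 + 1 * (j : Int))).reverse
        = ((m : Int) + 1) :: ((List.range m).map (fun j : Nat => 1 + 1 * (j : Int))).reverse := by
      rw [pv_range_succ, List.reverse_append]
      simp
    rw [hcast, hsplit]
    cases vals with
    | nil =>
      rw [List.find?_cons_of_pos (by simp)]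
      simp only [pvBloop]
      rw [if_pos (by omega)]
    | cons v rest =>
      have hv := hmem v (by simp)
      rw [hcast] at hv
      by_cases hlt : v < ((m:Int) + 1)
      · -- early return: m+1 is missing from vals
        have hnot : ¬ ((m:Int) + 1 ∈ v :: rest) := by
          intro hmm
          rcases List.mem_cons.mp hmm with h | h
          · omega
          · have := List.rel_of_pairwise_cons hpw h
            omega
        rw [List.find?_cons_of_pos (by simp [hnot])]
        simp only [pvBloop]
        rw [if_pos hlt]
      · -- v = m+1: consume it and recurse
        have hveq : v = (m:Int) + 1 := by omega
        have hmm : ((m:Int) + 1) ∈ v :: rest := by simp [← hveq]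
        rw [List.find?_cons_of_neg (by simp [hmm])]
        simp only [pvBloop]
        rw [if_neg (by omega), show ((m:Int) + 1 - 1) = (m : Int) from by ring]
        have hrest : ∀ u ∈ rest, 1 ≤ u ∧ u ≤ (m : Int) := by
          intro u hu
          have h1 := hmem u (List.mem_cons_of_mem v hu)
          rw [hcast] at h1
          have h2 := List.rel_of_pairwise_cons hpw hu
          exact ⟨h1.1, by omega⟩
        rw [ih rest (List.Pairwise.of_cons hpw) hrest]
        apply pv_find?_congr
        intro x hx
        rw [List.mem_reverse, pv_mem_range] at hx
        by_cases hxr : x ∈ rest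
        · simp [hxr, List.mem_cons_of_mem v hxr]
        · have hnc : ¬ (x ∈ v :: rest) := by
            intro hxc
            rcases List.mem_cons.mp hxc with h | h
            · omega
            · exact hxr h
          simp [hnc, hxr]

-- max of a strictly increasing list is its last element (unused name kept out; see pv_find?_reverse)

-- ===== VERDICT (by name: the statement is the Claim_ definition above) =====
theorem missingNum_dict_spec : Claim_equal_missingNum_dict := by
  intro nums _
  unfold Spec_missingNum_dict missingNum_dict missingNum_dict_alt
  simp only []
  rw [pv_rangeEq nums.length]
  set R : List Int := (List.range nums.length).map (fun j : Nat => 1 + 1 * (j : Int)) with hR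
  have hpw : R.Pairwise (· < ·) := pv_range_pairwise nums.length
  have hnd : R.Nodup := pv_pairwise_nodup hpw
  -- ---- A's side: the dict scan is getLast? of the still-zero keys ----
  have h1 : (R.foldl (fun d i => d.insert i 0) (PySem.Dict.empty : PySem.Dict Int Int))
      = PySem.Dict.mk (R.map (fun i => (i, (0:Int)))) := by
    have hit := pv_foldl_insert_fresh 0 R PySem.Dict.empty hnd
      (by intro i _; simp [PySem.Dict.empty, PySem.Dict.contains])
    have heta : (R.foldl (fun d i => d.insert i 0) (PySem.Dict.empty : PySem.Dict Int Int))
        = PySem.Dict.mk (R.foldl (fun d i => d.insert i 0) (PySem.Dict.empty : PySem.Dict Int Int)).items := rfl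
    rw [heta, hit]
    simp [PySem.Dict.empty]
  rw [h1]
  obtain ⟨tail, h2, htail⟩ := pv_foldl_insert_one nums R (fun _ => (0:Int)) [] (by simp)
  rw [List.append_nil] at h2
  rw [h2]
  have hA : (List.map (fun i => (i, if i ∈ nums then (1:Int) else 0)) R ++ tail).foldl
      (fun res p => if p.2 == 0 then some p.1 else res) none
      = (R.filter (fun i => !(decide (i ∈ nums)))).getLast? := by
    rw [List.foldl_append, pv_foldl_res_ones tail _ htail, List.foldl_map]
    have := pv_foldl_last_filter (fun i => ((if i ∈ nums then (1:Int) else 0) == 0)) R none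
    rw [show (fun res (i : Int) => if ((if i ∈ nums then (1:Int) else 0) == 0) then some i else res)
        = (fun res (i : Int) => if (fun i => ((if i ∈ nums then (1:Int) else 0) == 0)) i then some i else res) from rfl]
    rw [this]
    have hfe : R.filter (fun i => ((if i ∈ nums then (1:Int) else 0) == 0))
        = R.filter (fun i => !(decide (i ∈ nums))) := by
      apply List.filter_congr
      intro i _
      by_cases hi : i ∈ nums <;> simp [hi]
    rw [hfe]
    by_cases hemp : R.filter (fun i => !(decide (i ∈ nums))) = []
    · simp [hemp]
    · rw [if_neg hemp]
  rw [hA]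
  -- ---- B's side: vals is the reversed ascending list of in-range present values ----
  set vals := PySem.List.sorted
      (PySem.Set.ofList (nums.filter (fun x => decide (1 ≤ x) && decide (x ≤ (nums.length : Int)))))
      (fun x => x) true with hvals
  have hvals_eq : vals = (R.filter (fun i => decide (i ∈ nums))).reverse := by
    rw [hvals]
    apply PySem.List.sorted_rev_eq_of_perm_of_pairwise_gt
    · rw [List.perm_ext_iff_of_nodup]
      · intro a
        rw [List.mem_reverse, List.mem_filter, PySem.Set.mem_ofList, List.mem_filter, hR, pv_mem_range]
        constructor
        · rintro ⟨⟨h1, h2⟩, h3⟩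
          exact ⟨by simpa using h3, by simp; omega⟩
        · rintro ⟨h1, h2⟩
          simp at h2
          exact ⟨⟨by omega, by omega⟩, by simpa using h1⟩
      · exact List.nodup_reverse.mpr (List.Nodup.filter _ hnd)
      · exact PySem.Set.nodup_ofList _
    · rw [List.pairwise_reverse]
      exact List.Pairwise.filter _ hpw
  rw [hvals_eq]
  -- B's loop finds the largest missing value, i.e. the same getLast?
  have hmem : ∀ v ∈ (R.filter (fun i => decide (i ∈ nums))).reverse, 1 ≤ v ∧ v ≤ (nums.length : Int) := by
    intro v hv
    rw [List.mem_reverse, List.mem_filter, hR, pv_mem_range] at hv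
    exact hv.1
  have hpwv : ((R.filter (fun i => decide (i ∈ nums))).reverse).Pairwise (· > ·) := by
    rw [List.pairwise_reverse]
    exact List.Pairwise.filter _ hpw
  rw [pv_bloop_char nums.length _ hpwv hmem, ← hR, pv_find?_congr _ _ (fun i => !(decide (i ∈ nums))), pv_find?_reverse]
  intro x hx
  rw [List.mem_reverse] at hx
  have : x ∈ (R.filter (fun i => decide (i ∈ nums))).reverse ↔ x ∈ nums := by
    rw [List.mem_reverse, List.mem_filter]
    simp [hx]
  by_cases hxn : x ∈ nums
  · simp [this, hxn]
  · simp [this, hxn]
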